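-- pv_equiv track=rewrite | github.com/daceroso/python-challenges | mathematical/exercises/number_as_text.py | number_as_text
-- ===== SOURCE A (Python) =====
-- def number_as_text(n):
--     value_to_text = ""
--
--     while n > 0:
--         remainder = n % 10
--
--         if remainder == 0:
--             value_to_text = "ZERO" + " " + value_to_text
--         if remainder == 1:
--             value_to_text = "ONE" + " " + value_to_text
--
--         if remainder == 2:
--             value_to_text = "TWO" + " " + value_to_text
--
--         if remainder == 3:
--             value_to_text = "THREE" + " " + value_to_text
--
--         if remainder == 4:
--             value_to_text = "FOUR" + " " + value_to_text
--
--         if remainder == 5: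
--             value_to_text = "FIVE" + " " + value_to_text
--
--         if remainder == 6:
--             value_to_text = "SIX" + " " + value_to_text
--
--         if remainder == 7:
--             value_to_text = "SEVEN" + " " + value_to_text
--
--         if remainder == 8:
--             value_to_text = "EIGHT" + " " + value_to_text
--
--         if remainder == 9:
--             value_to_text = "NINE" + " " + value_to_text
--
--         n = n // 10
--     return value_to_text
-- ===== SOURCE B (Python) =====
-- WORDS = {'0': 'ZERO', '1': 'ONE', '2': 'TWO', '3': 'THREE', '4': 'FOUR',
--          '5': 'FIVE', '6': 'SIX', '7': 'SEVEN', '8': 'EIGHT', '9': 'NINE'}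
--
--
-- def number_as_text(n):
--     if n <= 0:
--         return ""
--     return ''.join(WORDS[c] + ' ' for c in str(n))
-- ===== Notes on version B (the rewrite author's own statement) =====
-- stated objective: idiomatic
-- what changed: Replaces the mod/floordiv arithmetic loop building the string back-to-front with a left-to-right traversal of str(n) mapping each digit character through a fixed word table joined in one pass.
import Mathlib
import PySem

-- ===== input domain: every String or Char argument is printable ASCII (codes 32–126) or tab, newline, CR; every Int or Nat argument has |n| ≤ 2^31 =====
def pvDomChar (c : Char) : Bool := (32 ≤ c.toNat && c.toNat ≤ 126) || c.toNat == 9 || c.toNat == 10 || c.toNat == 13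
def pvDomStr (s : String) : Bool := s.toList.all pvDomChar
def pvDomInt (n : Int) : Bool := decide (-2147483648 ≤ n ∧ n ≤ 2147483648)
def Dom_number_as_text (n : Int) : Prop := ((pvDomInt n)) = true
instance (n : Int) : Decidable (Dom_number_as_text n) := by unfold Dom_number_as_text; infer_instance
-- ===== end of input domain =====

-- B replaces A's mod/floordiv arithmetic loop (prepending words right-to-left) with a
-- left-to-right traversal of str(n) mapped through a fixed digit→word table and one join.

-- ===== PORT A =====
-- the while-loop of A: state = (n, value_to_text); ten sequential ifs on the remainder
-- the ten sequential 'if remainder == k' updates of value_to_text in A's loop body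
def number_as_text_step (remainder : Int) (acc : String) : String :=
  let acc := if remainder = 0 then "ZERO" ++ " " ++ acc else acc
  let acc := if remainder = 1 then "ONE" ++ " " ++ acc else acc
  let acc := if remainder = 2 then "TWO" ++ " " ++ acc else acc
  let acc := if remainder = 3 then "THREE" ++ " " ++ acc else acc
  let acc := if remainder = 4 then "FOUR" ++ " " ++ acc else acc
  let acc := if remainder = 5 then "FIVE" ++ " " ++ acc else acc
  let acc := if remainder = 6 then "SIX" ++ " " ++ acc else acc
  let acc := if remainder = 7 then "SEVEN" ++ " " ++ acc else acc
  let acc := if remainder = 8 then "EIGHT" ++ " " ++ acc else acc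
  if remainder = 9 then "NINE" ++ " " ++ acc else acc

def number_as_text_go (n : Int) (acc : String) : String :=
  if _h : n > 0 then
    number_as_text_go (PySem.Int.floordiv n 10) (number_as_text_step (PySem.Int.mod n 10) acc)
  else acc
termination_by n.toNat
decreasing_by
  simp only [PySem.Int.floordiv, Int.fdiv_eq_ediv]
  omega

def number_as_text (n : Int) : String := number_as_text_go n ""

-- ===== PORT B =====
def pvWords : PySem.Dict Char String :=
  PySem.Dict.ofList [('0', "ZERO"), ('1', "ONE"), ('2', "TWO"), ('3', "THREE"), ('4', "FOUR"),
    ('5', "FIVE"), ('6', "SIX"), ('7', "SEVEN"), ('8', "EIGHT"), ('9', "NINE")]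

-- ''.join(WORDS[c] + ' ' for c in str(n)); WORDS[c] ported as getD (for positive n every
-- character of str(n) is a digit, so the KeyError default is never taken)
def number_as_text_alt (n : Int) : String :=
  if n ≤ 0 then ""
  else PySem.Str.join "" ((PySem.Int.toStr n).toList.map (fun c => pvWords.getD c "" ++ " "))

-- ===== PRECONDITION & SPEC =====
def Spec_number_as_text (n : Int) (out : String) : Prop := out = number_as_text_alt n
instance (n : Int) (out : String) : Decidable (Spec_number_as_text n out) := by unfold Spec_number_as_text; infer_instance

-- ===== CLAIM (what is proved, stated in full; the proofs are below) =====
def Claim_equal_number_as_text : Prop := ∀ (n : Int), Dom_number_as_text n → Spec_number_as_text n (number_as_text n)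

-- ===== LEMMAS AND PROOFS =====

-- the word-list built by B from a digit-character list
def pvJ (ds : List Char) : String :=
  PySem.Str.join "" (ds.map (fun c => pvWords.getD c "" ++ " "))

theorem pvJ_nil : pvJ [] = "" := by decide

theorem pvJ_cons (c : Char) (cs : List Char) :
    pvJ (c :: cs) = (pvWords.getD c "" ++ " ") ++ pvJ cs := by
  apply String.toList_inj.mp
  cases cs with
  | nil =>
    simp [pvJ, PySem.Str.toList_join, PySem.Chars.join_singleton, PySem.Chars.join_nil]
  | cons d ds =>
    simp [pvJ, PySem.Str.toList_join, PySem.Chars.join_cons_cons]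

theorem pvJ_append (l1 l2 : List Char) : pvJ (l1 ++ l2) = pvJ l1 ++ pvJ l2 := by
  induction l1 with
  | nil => simp [pvJ_nil]
  | cons c cs ih => simp [pvJ_cons, ih, String.append_assoc]

theorem toDigitsCore_acc (f : Nat) : ∀ (n : Nat) (l : List Char),
    Nat.toDigitsCore 10 f n l = Nat.toDigitsCore 10 f n [] ++ l := by
  induction f with
  | zero => intro n l; simp [Nat.toDigitsCore]
  | succ f ih =>
    intro n l
    simp only [Nat.toDigitsCore]
    by_cases h : n / 10 = 0
    · simp [h]
    · simp only [h, if_false]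
      rw [ih (n / 10) (Nat.digitChar (n % 10) :: l), ih (n / 10) [Nat.digitChar (n % 10)]]
      simp

theorem toDigitsCore_fuel : ∀ (f g n : Nat), n < f → n < g →
    Nat.toDigitsCore 10 f n [] = Nat.toDigitsCore 10 g n [] := by
  intro f
  induction f with
  | zero => intro g n h; omega
  | succ f ih =>
    intro g n hf hg
    cases g with
    | zero => omega
    | succ g =>
      simp only [Nat.toDigitsCore]
      by_cases h : n / 10 = 0
      · simp [h]
      · simp only [h, if_false]
        rw [toDigitsCore_acc f, toDigitsCore_acc g, ih g (n / 10) (by omega) (by omega)]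

theorem toDigits_small {n : Nat} (h : n < 10) : Nat.toDigits 10 n = [Nat.digitChar n] := by
  simp [Nat.toDigits, Nat.toDigitsCore, Nat.div_eq_of_lt h, Nat.mod_eq_of_lt h]

theorem toDigits_rec {n : Nat} (h : 10 ≤ n) :
    Nat.toDigits 10 n = Nat.toDigits 10 (n / 10) ++ [Nat.digitChar (n % 10)] := by
  have h0 : n / 10 ≠ 0 := by omega
  simp only [Nat.toDigits, Nat.toDigitsCore, h0, if_false]
  rw [toDigitsCore_acc n (n / 10)]
  congr 1
  exact toDigitsCore_fuel n (n / 10 + 1) (n / 10) (by omega) (by omega)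

-- one A-loop step on a digit r builds exactly B's word for that digit character
theorem pvStep_eq (r : Int) (h0 : 0 ≤ r) (h9 : r < 10) (acc : String) :
    number_as_text_step r acc = (pvWords.getD (Nat.digitChar r.toNat) "" ++ " ") ++ acc := by
  unfold number_as_text_step
  interval_cases r <;>
    norm_num [Nat.digitChar, pvWords, PySem.Dict.getD, PySem.Dict.ofList, PySem.Dict.get?,
      String.append_assoc] <;> decide

theorem pvGo_eq (m : Nat) : 0 < m → ∀ acc : String,
    number_as_text_go (m : Int) acc = pvJ (Nat.toDigits 10 m) ++ acc := by
  induction m using Nat.strong_induction_on with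
  | _ m ih =>
    intro hm acc
    have hpos : (0:Int) < (m:Int) := by exact_mod_cast hm
    rw [number_as_text_go, dif_pos hpos]
    have hmod : PySem.Int.mod (m:Int) 10 = ((m % 10 : Nat) : Int) := by
      simp [PySem.Int.mod, Int.fmod_eq_emod]
    have hdiv : PySem.Int.floordiv (m:Int) 10 = ((m / 10 : Nat) : Int) := by
      simp [PySem.Int.floordiv, Int.fdiv_eq_ediv]
    rw [hmod, hdiv,
      pvStep_eq ((m % 10 : Nat) : Int) (by positivity)
        (by exact_mod_cast Nat.mod_lt m (by norm_num))]
    have htn : ((m % 10 : Nat) : Int).toNat = m % 10 := by omega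
    rw [htn]
    by_cases hsmall : m < 10
    · have hq : m / 10 = 0 := Nat.div_eq_of_lt hsmall
      have hr : m % 10 = m := Nat.mod_eq_of_lt hsmall
      rw [hq, hr]
      rw [number_as_text_go]
      simp [toDigits_small hsmall, pvJ_cons, pvJ_nil]
    · have hq : 0 < m / 10 := Nat.div_pos (by omega) (by norm_num)
      rw [ih (m / 10) (by omega) hq]
      conv_rhs => rw [toDigits_rec (show 10 ≤ m by omega), pvJ_append, pvJ_cons, pvJ_nil]
      simp [String.append_assoc]

theorem pvMain (n : Int) : number_as_text n = number_as_text_alt n := by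
  by_cases h : n ≤ 0
  · rw [number_as_text, number_as_text_go, dif_neg (by omega), number_as_text_alt, if_pos h]
  · have hpos : 0 < n := by omega
    have hn : ((n.toNat : Nat) : Int) = n := by omega
    rw [number_as_text, number_as_text_alt, if_neg h]
    rw [← hn, pvGo_eq n.toNat (by omega)]
    have hchars : (PySem.Int.toStr ((n.toNat : Nat) : Int)).toList = Nat.toDigits 10 n.toNat := by
      rw [PySem.Int.toList_toStr, PySem.Int.toChars]
      simp only [if_neg (by omega : ¬ ((n.toNat : Nat) : Int) < 0)]
      simp
      rw [show max n 0 = n from by omega]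
    rw [hchars]
    show pvJ (Nat.toDigits 10 n.toNat) ++ "" = pvJ (Nat.toDigits 10 n.toNat)
    simp

-- ===== VERDICT (by name: the statement is the Claim_ definition above) =====
theorem number_as_text_spec : Claim_equal_number_as_text := by
  intro n _
  unfold Spec_number_as_text
  exact pvMain n
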